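-- pv_equiv track=rewrite | github.com/YelovSK/Advent-of-Code | 10/part2.py | score_incomplete
-- ===== SOURCE A (Python) =====
-- pairs = {
--     "[": "]",
--     "{": "}",
--     "(": ")",
--     "<": ">"
-- }
--
-- bracket_vals = {
--     ")": 1,
--     "]": 2,
--     "}": 3,
--     ">": 4
-- }
--
-- def score_incomplete(line):
--     score = 0
--     opening = []
--     for char in line:
--         if char in pairs.keys():
--             opening.insert(0, char)
--         elif char in bracket_vals.keys():
--             opening.pop(0)
--     for char in opening:
--         score *= 5
--         score += bracket_vals[pairs[char]]
--     return score
-- ===== SOURCE B (Python) =====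
-- OPEN_VALS = {"(": 1, "[": 2, "{": 3, "<": 4}
-- CLOSERS = ")]}>"
--
-- def score_incomplete(line):
--     # Stackless: scan right-to-left; a pending-closer counter replaces the stack.
--     # Unmatched openers are met in most-significant-first order, so the score
--     # accumulates directly.
--     score = 0
--     pending = 0
--     for ch in reversed(line):
--         if ch in CLOSERS:
--             pending += 1
--         elif ch in OPEN_VALS:
--             if pending != 0:
--                 pending -= 1
--             else:
--                 score = score * 5 + OPEN_VALS[ch]
--     return score
-- ===== Notes on version B (the rewrite author's own statement) =====
-- stated objective: faster
-- what changed: B drops the stack entirely: a single right-to-left pass keeps only an integer counter of pending closers and accumulates the score directly when it meets an unmatched opener, replacing A's insert(0)/pop(0) list stack (O(n) per operation) plus second scoring loop.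
import Mathlib
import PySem

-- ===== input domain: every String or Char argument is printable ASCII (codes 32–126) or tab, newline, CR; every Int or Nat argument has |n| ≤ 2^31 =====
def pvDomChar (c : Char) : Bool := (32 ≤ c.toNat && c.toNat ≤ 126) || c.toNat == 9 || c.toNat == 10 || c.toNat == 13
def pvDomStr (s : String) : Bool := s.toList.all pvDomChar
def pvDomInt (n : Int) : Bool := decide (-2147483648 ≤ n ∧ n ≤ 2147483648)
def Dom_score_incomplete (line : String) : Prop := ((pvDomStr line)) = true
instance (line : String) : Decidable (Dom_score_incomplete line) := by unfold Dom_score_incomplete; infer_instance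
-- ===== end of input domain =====

-- B replaces A's stack (insert(0)/pop(0), O(n) each) by a single right-to-left pass with an
-- integer counter of pending closers: O(n) time, O(1) extra space.

-- ===== PORT A =====
-- bracket_vals[pairs[c]]; in A only opening brackets ever reach this lookup, so it always succeeds
def pvValA (c : Char) : Int :=
  if c = '[' then 2 else if c = '{' then 3 else if c = '(' then 1 else if c = '<' then 4 else 0

-- one iteration of A's first loop; state none = IndexError already raised (excluded by Pre_)
def pvStepA (acc : Option (List Char)) (c : Char) : Option (List Char) :=
  match acc with
  | none => none
  | some opening =>
    if c = '[' ∨ c = '{' ∨ c = '(' ∨ c = '<' then some (PySem.List.insert opening 0 c)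
    else if c = ')' ∨ c = ']' ∨ c = '}' ∨ c = '>' then
      match PySem.List.pop? opening 0 with
      | none => none        -- Python: IndexError
      | some (_, rest) => some rest
    else some opening

def score_incomplete (line : String) : Int :=
  match line.toList.foldl pvStepA (some []) with
  | none => 0               -- unreachable under Pre_ (Python raises IndexError)
  | some opening => opening.foldl (fun s c => s * 5 + pvValA c) 0

-- ===== PORT B =====
-- OPEN_VALS lookup
def pvValB (c : Char) : Int :=
  if c = '(' then 1 else if c = '[' then 2 else if c = '{' then 3 else if c = '<' then 4 else 0

-- one iteration of B's loop over the reversed line; state = (score, pending)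
def pvStepB (st : Int × Int) (c : Char) : Int × Int :=
  if c = ')' ∨ c = ']' ∨ c = '}' ∨ c = '>' then (st.1, st.2 + 1)
  else if c = '(' ∨ c = '[' ∨ c = '{' ∨ c = '<' then
    if st.2 ≠ 0 then (st.1, st.2 - 1) else (st.1 * 5 + pvValB c, st.2)
  else st

def score_incomplete_alt (line : String) : Int :=
  (line.toList.reverse.foldl pvStepB (0, 0)).1

-- ===== PRECONDITION & SPEC =====
-- Pre_ excludes exactly the lines on which Python's pop on an empty stack raises IndexError
-- (some prefix contains more closing than opening brackets).
def Pre_score_incomplete (line : String) : Prop :=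
  ∀ i ∈ List.range (line.toList.length + 1),
    (line.toList.take i).countP (fun c => c = ')' ∨ c = ']' ∨ c = '}' ∨ c = '>') ≤
    (line.toList.take i).countP (fun c => c = '[' ∨ c = '{' ∨ c = '(' ∨ c = '<')
instance (line : String) : Decidable (Pre_score_incomplete line) := by unfold Pre_score_incomplete; infer_instance
def pvWitness_score_incomplete : String := "[({<ab>"
def Spec_score_incomplete (line : String) (out : Int) : Prop := out = score_incomplete_alt line
instance (line : String) (out : Int) : Decidable (Spec_score_incomplete line out) := by unfold Spec_score_incomplete; infer_instance

-- ===== CLAIM (what is proved, stated in full; the proofs are below) =====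
def Claim_equal_score_incomplete : Prop := ∀ (line : String), Dom_score_incomplete line → Pre_score_incomplete line → Spec_score_incomplete line (score_incomplete line)

-- ===== LEMMAS AND PROOFS =====

theorem pvVal_eq (c : Char) : pvValA c = pvValB c := by
  unfold pvValA pvValB; split_ifs <;> simp_all

-- proof-only ghost: the reverse scan carrying the actual list of unmatched openers
def pvGStep (st : List Char × Nat) (c : Char) : List Char × Nat :=
  if c = ')' ∨ c = ']' ∨ c = '}' ∨ c = '>' then (st.1, st.2 + 1)
  else if c = '(' ∨ c = '[' ∨ c = '{' ∨ c = '<' then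
    if st.2 ≠ 0 then (st.1, st.2 - 1) else (st.1 ++ [c], st.2)
  else st

-- B's scan computes the score of the ghost's opener list and casts its pending counter
theorem pvB_ghost (l : List Char) : ∀ (U : List Char) (k : Nat),
    l.foldl pvStepB (U.foldl (fun s c => s * 5 + pvValB c) 0, (k : Int)) =
      (((l.foldl pvGStep (U, k)).1).foldl (fun s c => s * 5 + pvValB c) 0,
       ((l.foldl pvGStep (U, k)).2 : Int)) := by
  induction l with
  | nil => intro U k; rfl
  | cons c l ih =>
    intro U k
    simp only [List.foldl_cons]
    have h : pvStepB (U.foldl (fun s c => s * 5 + pvValB c) 0, (k : Int)) c =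
        (((pvGStep (U, k) c).1).foldl (fun s c => s * 5 + pvValB c) 0,
         ((pvGStep (U, k) c).2 : Int)) := by
      unfold pvStepB pvGStep
      by_cases hc : c = ')' ∨ c = ']' ∨ c = '}' ∨ c = '>'
      · simp [hc]
      · by_cases ho : c = '(' ∨ c = '[' ∨ c = '{' ∨ c = '<'
        · by_cases hk : k = 0
          · subst hk; simp [hc, ho]
          · have hki : (k : Int) ≠ 0 := by exact_mod_cast hk
            simp only [if_neg hc, if_pos ho, if_pos hki, if_pos hk]
            have hcast : (k : Int) - 1 = ((k - 1 : Nat) : Int) := by omega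
            rw [hcast]
        · simp [hc, ho]
    rw [h]
    have := ih (pvGStep (U, k) c).1 (pvGStep (U, k) c).2
    simpa using this

-- A's stack run is characterised by the ghost reverse scan
theorem pvA_ghost (cs : List Char) : ∀ (st : List Char),
    (∀ i : Nat, (cs.take i).countP (fun c => c = ')' ∨ c = ']' ∨ c = '}' ∨ c = '>') ≤
        (cs.take i).countP (fun c => c = '[' ∨ c = '{' ∨ c = '(' ∨ c = '<') + st.length) →
    (cs.reverse.foldl pvGStep ([], 0)).2 ≤ st.length ∧
    cs.foldl pvStepA (some st) =
      some ((cs.reverse.foldl pvGStep ([], 0)).1 ++ st.drop (cs.reverse.foldl pvGStep ([], 0)).2) := by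
  induction cs with
  | nil => intro st _; simp
  | cons c cs ih =>
    intro st hyp
    have hrev : (c :: cs).reverse.foldl pvGStep (([], 0) : List Char × Nat) =
        pvGStep (cs.reverse.foldl pvGStep ([], 0)) c := by
      simp [List.reverse_cons, List.foldl_append]
    by_cases ho : c = '[' ∨ c = '{' ∨ c = '(' ∨ c = '<'
    · have ho' : c = '(' ∨ c = '[' ∨ c = '{' ∨ c = '<' := by tauto
      have hc : ¬ (c = ')' ∨ c = ']' ∨ c = '}' ∨ c = '>') := by
        rcases ho with h|h|h|h <;> subst h <;> simp
      have hstep : (c :: cs).foldl pvStepA (some st) =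
          cs.foldl pvStepA (some (c :: st)) := by
        simp [pvStepA, ho, PySem.List.insert_zero]
      have hyp' : ∀ i : Nat, (cs.take i).countP (fun c => c = ')' ∨ c = ']' ∨ c = '}' ∨ c = '>') ≤
          (cs.take i).countP (fun c => c = '[' ∨ c = '{' ∨ c = '(' ∨ c = '<') + (c :: st).length := by
        intro i
        have := hyp (i + 1)
        simp only [List.take_succ_cons, List.countP_cons, List.length_cons] at this ⊢
        simp only [decide_eq_true_eq] at this
        by_cases hh : (decide (c = '[' ∨ c = '{' ∨ c = '(' ∨ c = '<')) = true <;>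
          simp_all; omega
      obtain ⟨hk, heq⟩ := ih (c :: st) hyp'
      set G := cs.reverse.foldl pvGStep (([], 0) : List Char × Nat) with hG
      rw [hrev]
      have hg : pvGStep G c = if G.2 ≠ 0 then (G.1, G.2 - 1) else (G.1 ++ [c], G.2) := by
        simp [pvGStep, hc, ho']
      rw [hg]
      simp only [List.length_cons] at hk
      by_cases hkz : G.2 = 0
      · rw [if_neg (by simp [hkz])]
        refine ⟨by omega, ?_⟩
        rw [hstep, heq, hkz]
        simp
      · rw [if_pos hkz]
        refine ⟨by simp only []; omega, ?_⟩
        rw [hstep, heq]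
        have hd : (c :: st).drop G.2 = st.drop (G.2 - 1) := by
          obtain ⟨m, hm⟩ : ∃ m, G.2 = m + 1 := ⟨G.2 - 1, by omega⟩
          rw [hm]; simp
        rw [hd]
    · by_cases hc : c = ')' ∨ c = ']' ∨ c = '}' ∨ c = '>'
      · -- closer: stack must be nonempty
        have h1 := hyp 1
        have hlen : 1 ≤ st.length := by
          simp only [List.take_succ_cons, List.take_zero, List.countP_cons, List.countP_nil] at h1
          simp only [decide_eq_true_eq] at h1
          simp only [hc, ho] at h1
          simpa using h1
        obtain ⟨h, t, rfl⟩ : ∃ h t, st = h :: t := by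
          cases st with
          | nil => simp at hlen
          | cons h t => exact ⟨h, t, rfl⟩
        have hstep : (c :: cs).foldl pvStepA (some (h :: t)) =
            cs.foldl pvStepA (some t) := by
          simp [pvStepA, ho, hc, PySem.List.pop?_zero_cons]
        have hyp' : ∀ i : Nat, (cs.take i).countP (fun c => c = ')' ∨ c = ']' ∨ c = '}' ∨ c = '>') ≤
            (cs.take i).countP (fun c => c = '[' ∨ c = '{' ∨ c = '(' ∨ c = '<') + t.length := by
          intro i
          have := hyp (i + 1)
          simp only [List.take_succ_cons, List.countP_cons, List.length_cons] at this ⊢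
          simp only [decide_eq_true_eq] at this
          simp only [hc, ho] at this
          simp_all; omega
        obtain ⟨hk, heq⟩ := ih t hyp'
        set G := cs.reverse.foldl pvGStep (([], 0) : List Char × Nat) with hG
        rw [hrev]
        have hg : pvGStep G c = (G.1, G.2 + 1) := by simp [pvGStep, hc]
        rw [hg]
        refine ⟨by simp only [List.length_cons]; omega, ?_⟩
        rw [hstep, heq]
        simp
      · -- other char
        have hstep : (c :: cs).foldl pvStepA (some st) = cs.foldl pvStepA (some st) := by
          simp [pvStepA, ho, hc]
        have hyp' : ∀ i : Nat, (cs.take i).countP (fun c => c = ')' ∨ c = ']' ∨ c = '}' ∨ c = '>') ≤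
            (cs.take i).countP (fun c => c = '[' ∨ c = '{' ∨ c = '(' ∨ c = '<') + st.length := by
          intro i
          have := hyp (i + 1)
          simp only [List.take_succ_cons, List.countP_cons] at this ⊢
          simp only [decide_eq_true_eq] at this
          simp only [hc, ho] at this
          simpa using this
        obtain ⟨hk, heq⟩ := ih st hyp'
        have ho2 : ¬ (c = '(' ∨ c = '[' ∨ c = '{' ∨ c = '<') := by tauto
        rw [hrev]
        have hg : pvGStep (cs.reverse.foldl pvGStep ([], 0)) c =
            cs.reverse.foldl pvGStep ([], 0) := by simp [pvGStep, hc, ho2]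
        rw [hg]
        exact ⟨hk, by rw [hstep, heq]⟩

theorem pvScore_congr (l : List Char) : ∀ (s : Int),
    l.foldl (fun s c => s * 5 + pvValA c) s = l.foldl (fun s c => s * 5 + pvValB c) s := by
  intro s
  simp only [pvVal_eq]

-- ===== VERDICT (by name: the statement is the Claim_ definition above) =====
theorem score_incomplete_spec : Claim_equal_score_incomplete := by
  intro line _ hpre
  unfold Spec_score_incomplete score_incomplete score_incomplete_alt
  unfold Pre_score_incomplete at hpre
  set cs := line.toList with hcs
  have hyp : ∀ i : Nat, (cs.take i).countP (fun c => c = ')' ∨ c = ']' ∨ c = '}' ∨ c = '>') ≤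
      (cs.take i).countP (fun c => c = '[' ∨ c = '{' ∨ c = '(' ∨ c = '<') + ([] : List Char).length := by
    intro i
    simp only [List.length_nil, Nat.add_zero]
    by_cases hi : i ≤ cs.length
    · exact hpre i (List.mem_range.mpr (by omega))
    · rw [List.take_of_length_le (by omega), ← List.take_length (l := cs)]
      exact hpre cs.length (List.mem_range.mpr (by omega))
  obtain ⟨hk, heq⟩ := pvA_ghost cs [] hyp
  simp only [List.length_nil, Nat.le_zero] at hk
  rw [heq]
  simp only [List.drop_nil, List.append_nil]
  have hb := pvB_ghost cs.reverse [] 0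
  simp only [List.foldl_nil, Nat.cast_zero] at hb
  rw [hb]
  exact pvScore_congr _ 0
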